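-- pv_equiv track=rewrite | github.com/buglens-artifact/BugLens | plot_curves.py | calculate_distinct_counts
-- ===== SOURCE A (Python) =====
-- def calculate_distinct_counts(bug_id_list, prefix_length=None):
--     id = 1
--     distinct_counts = []
--     seen = set()
--     length = min(prefix_length, len(bug_id_list)) if prefix_length else len(bug_id_list)
--
--     for i in range(length):
--         seen.add(bug_id_list[i])
--         distinct_counts.append(len(seen))
--         if i == 0 or distinct_counts[i] > distinct_counts[i - 1]:
--             id += 1
--     return distinct_counts
-- ===== SOURCE B (Python) =====
-- def calculate_distinct_counts(bug_id_list, prefix_length=None):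
--     length = min(prefix_length, len(bug_id_list)) if prefix_length else len(bug_id_list)
--     firsts = []
--     seen = set()
--     for x in bug_id_list[:max(length, 0)]:
--         firsts.append(x not in seen)
--         seen.add(x)
--     counts = []
--     total = 0
--     for f in firsts:
--         total += f
--         counts.append(total)
--     return counts
-- ===== Notes on version B (the rewrite author's own statement) =====
-- stated objective: alternative
-- what changed: Replaces the index loop that reads len(seen) after every insertion (and tracks a dead id counter) by two passes: a pass over the sliced prefix recording a novelty boolean per element, then a prefix-sum pass over those booleans.
import Mathlib
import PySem

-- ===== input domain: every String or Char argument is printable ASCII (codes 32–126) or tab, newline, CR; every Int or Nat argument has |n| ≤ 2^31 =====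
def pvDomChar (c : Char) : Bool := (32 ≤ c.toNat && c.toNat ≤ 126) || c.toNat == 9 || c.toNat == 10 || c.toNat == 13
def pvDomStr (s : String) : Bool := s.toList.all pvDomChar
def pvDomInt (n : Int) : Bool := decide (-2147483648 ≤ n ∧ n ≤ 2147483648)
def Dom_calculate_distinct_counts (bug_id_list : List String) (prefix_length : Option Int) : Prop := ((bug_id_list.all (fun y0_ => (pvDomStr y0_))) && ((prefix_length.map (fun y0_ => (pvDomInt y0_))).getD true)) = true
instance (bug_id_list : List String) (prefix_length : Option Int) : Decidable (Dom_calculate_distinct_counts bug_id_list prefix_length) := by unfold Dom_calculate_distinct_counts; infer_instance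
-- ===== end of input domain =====

-- B replaces A's index loop (which reads len(seen) after every insertion and tracks a dead
-- id counter) by a novelty-boolean pass over the sliced prefix followed by a prefix-sum pass.

-- ===== PORT A =====
-- length = min(prefix_length, len(bug_id_list)) if prefix_length else len(bug_id_list)
def pvLen (bug_id_list : List String) (prefix_length : Option Int) : Int :=
  match prefix_length with
  | none => (bug_id_list.length : Int)
  | some v => if v = 0 then (bug_id_list.length : Int) else min v (bug_id_list.length : Int)

-- A's loop body; the index i is always in range, so pyGetD is exact here.
def aStep (bug_id_list : List String) (st : PySem.Set String × List Int × Int) (i : Int) :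
    PySem.Set String × List Int × Int :=
  let seen := PySem.Set.add st.1 (PySem.List.pyGetD bug_id_list i "")
  let dc := st.2.1 ++ [(seen.length : Int)]
  let id := if i = 0 ∨ PySem.List.pyGetD dc i 0 > PySem.List.pyGetD dc (i - 1) 0
            then st.2.2 + 1 else st.2.2
  (seen, dc, id)

def calculate_distinct_counts (bug_id_list : List String) (prefix_length : Option Int) : List Int :=
  let length := pvLen bug_id_list prefix_length
  ((PySem.List.pyRange 0 length 1).foldl (aStep bug_id_list)
    (PySem.Set.empty, [], 1)).2.1

-- ===== PORT B =====
-- firsts.append(x not in seen); seen.add(x)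
def bStep1 (st : List Bool × PySem.Set String) (x : String) : List Bool × PySem.Set String :=
  (st.1 ++ [!(PySem.Set.contains st.2 x)], PySem.Set.add st.2 x)

-- total += f; counts.append(total)
def bStep2 (st : List Int × Int) (f : Bool) : List Int × Int :=
  let total := st.2 + (if f then 1 else 0)
  (st.1 ++ [total], total)

def calculate_distinct_counts_alt (bug_id_list : List String) (prefix_length : Option Int) : List Int :=
  let length := pvLen bug_id_list prefix_length
  let firsts := ((PySem.List.slice bug_id_list none (some (max length 0))).foldl bStep1
    ([], PySem.Set.empty)).1
  (firsts.foldl bStep2 ([], 0)).1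

-- ===== PRECONDITION & SPEC =====
def Spec_calculate_distinct_counts (bug_id_list : List String) (prefix_length : Option Int) (out : List Int) : Prop := out = calculate_distinct_counts_alt bug_id_list prefix_length
instance (bug_id_list : List String) (prefix_length : Option Int) (out : List Int) : Decidable (Spec_calculate_distinct_counts bug_id_list prefix_length out) := by unfold Spec_calculate_distinct_counts; infer_instance

-- ===== CLAIM (what is proved, stated in full; the proofs are below) =====
def Claim_equal_calculate_distinct_counts : Prop := ∀ (bug_id_list : List String) (prefix_length : Option Int), Dom_calculate_distinct_counts bug_id_list prefix_length → Spec_calculate_distinct_counts bug_id_list prefix_length (calculate_distinct_counts bug_id_list prefix_length)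

-- ===== LEMMAS AND PROOFS =====

-- projection of A's fold: the id component never feeds back into (seen, dc)
def pStep (bug_id_list : List String) (st : PySem.Set String × List Int) (i : Int) :
    PySem.Set String × List Int :=
  let seen := PySem.Set.add st.1 (PySem.List.pyGetD bug_id_list i "")
  (seen, st.2 ++ [(seen.length : Int)])

theorem aStep_proj (xs : List String) (l : List Int) (st : PySem.Set String × List Int × Int) :
    ((l.foldl (aStep xs) st).1, (l.foldl (aStep xs) st).2.1)
      = l.foldl (pStep xs) (st.1, st.2.1) := by
  induction l generalizing st with
  | nil => rfl
  | cons i t ih => simpa [aStep, pStep] using ih (aStep xs st i)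

-- reference: running distinct counts of ys on top of seen-set s
def refCounts (ys : List String) (s : PySem.Set String) : List Int :=
  match ys with
  | [] => []
  | x :: r => ((PySem.Set.add s x).length : Int) :: refCounts r (PySem.Set.add s x)

theorem pStep_foldl (ys : List String) (s : PySem.Set String) (dc : List Int) :
    (ys.foldl (fun st x =>
        ((PySem.Set.add st.1 x), st.2 ++ [((PySem.Set.add st.1 x).length : Int)]))
      (s, dc)).2 = dc ++ refCounts ys s := by
  induction ys generalizing s dc with
  | nil => simp [refCounts]
  | cons x r ih => simp [refCounts, ih]

def novelty (ys : List String) (s : PySem.Set String) : List Bool :=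
  match ys with
  | [] => []
  | x :: r => (!(PySem.Set.contains s x)) :: novelty r (PySem.Set.add s x)

theorem bStep1_foldl (ys : List String) (s : PySem.Set String) (fs : List Bool) :
    (ys.foldl bStep1 (fs, s)).1 = fs ++ novelty ys s := by
  induction ys generalizing s fs with
  | nil => simp [novelty]
  | cons x r ih => simp [novelty, bStep1, ih]

def psums (fs : List Bool) (t : Int) : List Int :=
  match fs with
  | [] => []
  | f :: r => (t + (if f then 1 else 0)) :: psums r (t + (if f then 1 else 0))

theorem bStep2_foldl (fs : List Bool) (t : Int) (cs : List Int) :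
    (fs.foldl bStep2 (cs, t)).1 = cs ++ psums fs t := by
  induction fs generalizing t cs with
  | nil => simp [psums]
  | cons f r ih => simp [psums, bStep2, ih]

theorem psums_novelty (ys : List String) (s : PySem.Set String) :
    psums (novelty ys s) (s.length : Int) = refCounts ys s := by
  induction ys generalizing s with
  | nil => rfl
  | cons x r ih =>
      have hkey : ((PySem.Set.add s x).length : Int)
          = (s.length : Int) + (if !(PySem.Set.contains s x) then 1 else 0) := by
        by_cases h : x ∈ s
        · rw [PySem.Set.add_of_mem h, (PySem.Set.contains_iff s x).2 h]
          simp
        · have hc : PySem.Set.contains s x = false := by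
            rcases Bool.eq_false_or_eq_true (PySem.Set.contains s x) with ht | hf
            · exact absurd ((PySem.Set.contains_iff s x).1 ht) h
            · exact hf
          rw [PySem.Set.add_of_not_mem h, hc]
          push_cast [List.length_append]
          simp
      show ((s.length : Int) + (if !(PySem.Set.contains s x) then 1 else 0))
            :: psums (novelty r (PySem.Set.add s x))
                ((s.length : Int) + (if !(PySem.Set.contains s x) then 1 else 0))
          = ((PySem.Set.add s x).length : Int) :: refCounts r (PySem.Set.add s x)
      rw [← hkey, ih]

theorem pvLen_le (xs : List String) (p : Option Int) : pvLen xs p ≤ (xs.length : Int) := by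
  unfold pvLen
  cases p with
  | none => exact le_refl _
  | some v => split <;> omega

-- ===== VERDICT (by name: the statement is the Claim_ definition above) =====
theorem calculate_distinct_counts_spec : Claim_equal_calculate_distinct_counts := by
  intro xs p _
  unfold Spec_calculate_distinct_counts calculate_distinct_counts calculate_distinct_counts_alt
  set L := pvLen xs p with hL
  have hle : L ≤ (xs.length : Int) := pvLen_le xs p
  have hn : L.toNat ≤ xs.length := by omega
  have htk : (xs.take L.toNat).length = L.toNat := by
    rw [List.length_take]
    omega
  -- B's slice is the take-prefix
  have hslice : PySem.List.slice xs none (some (max L 0)) = xs.take L.toNat := by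
    rw [PySem.List.slice_to _ (le_max_right L 0)]
    congr 1
    omega
  -- A's fold, projected then turned into a fold over the same prefix
  have hproj := aStep_proj xs (PySem.List.pyRange 0 L 1) (PySem.Set.empty, [], 1)
  have hrange : PySem.List.pyRange 0 L 1 = PySem.List.pyRange 0 ((xs.take L.toNat).length : Int) 1 := by
    by_cases h0 : 0 ≤ L
    · congr 1
      rw [htk]
      omega
    · rw [PySem.List.pyRange_one_eq_nil (by omega),
          PySem.List.pyRange_one_eq_nil (by rw [htk]; omega)]
  have hcongr : (PySem.List.pyRange 0 L 1).foldl (pStep xs) (PySem.Set.empty, [])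
      = (PySem.List.pyRange 0 L 1).foldl (pStep (xs.take L.toNat)) (PySem.Set.empty, []) := by
    apply PySem.List.foldl_congr_mem
    intro acc i hi
    have hi' := (PySem.List.mem_pyRange_one).1 hi
    have hget : PySem.List.pyGetD xs i "" = PySem.List.pyGetD (xs.take L.toNat) i "" := by
      have h1 : i < ((xs.take L.toNat).length : Int) := by
        rw [htk]
        omega
      rw [PySem.List.pyGetD_eq_getElem xs "" hi'.1 (by omega),
          PySem.List.pyGetD_eq_getElem (xs.take L.toNat) "" hi'.1 h1]
      simp [List.getElem_take]
    simp [pStep, hget]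
  have hfold : (PySem.List.pyRange 0 L 1).foldl (pStep (xs.take L.toNat)) (PySem.Set.empty, [])
      = (xs.take L.toNat).foldl (fun st x =>
          ((PySem.Set.add st.1 x), st.2 ++ [((PySem.Set.add st.1 x).length : Int)]))
        (PySem.Set.empty, []) := by
    have hps : pStep (xs.take L.toNat) = (fun (st : PySem.Set String × List Int) (j : Int) =>
        (fun (st : PySem.Set String × List Int) (x : String) =>
          ((PySem.Set.add st.1 x), st.2 ++ [((PySem.Set.add st.1 x).length : Int)])) st
          (PySem.List.pyGetD (xs.take L.toNat) j "")) := by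
      funext st j
      simp [pStep]
    rw [hrange, hps]
    exact PySem.List.foldl_pyRange_zero_pyGetD' (xs.take L.toNat) ""
      (fun st x => ((PySem.Set.add st.1 x), st.2 ++ [((PySem.Set.add st.1 x).length : Int)]))
      (PySem.Set.empty, [])
  have hA : ((PySem.List.pyRange 0 L 1).foldl (aStep xs) (PySem.Set.empty, [], 1)).2.1
      = refCounts (xs.take L.toNat) PySem.Set.empty := by
    have h2 := congrArg Prod.snd hproj
    simp only at h2
    rw [h2, hcongr, hfold, pStep_foldl]
    rfl
  -- B's two folds give the same reference
  have hB : (((PySem.List.slice xs none (some (max L 0))).foldl bStep1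
        ([], PySem.Set.empty)).1.foldl bStep2 ([], 0)).1
      = refCounts (xs.take L.toNat) PySem.Set.empty := by
    rw [hslice, bStep1_foldl, bStep2_foldl]
    simpa using psums_novelty (xs.take L.toNat) PySem.Set.empty
  simp only [hA, hB]
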